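-- pv_equiv track=rewrite | github.com/matuskalis/speaksharp2.0 | backend/app/utils/phoneme_mapper.py | text_to_ipa_estimate
-- ===== SOURCE A (Python) =====
-- def text_to_ipa_estimate(text: str) -> str:
--     """
--     Rough estimate of IPA for English text
--     (Not accurate, just for display when Azure doesn't provide phonemes)
--
--     Args:
--         text: English word or phrase
--
--     Returns:
--         Estimated IPA (very rough approximation)
--     """
--     # This is a simplified mapping - real IPA requires pronunciation dictionary
--     simple_map = {
--         "th": "θ",
--         "sh": "ʃ",
--         "ch": "tʃ",
--         "ng": "ŋ",
--         "a": "æ",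
--         "e": "ɛ",
--         "i": "ɪ",
--         "o": "ɑ",
--         "u": "ʌ",
--     }
--
--     result = text.lower()
--     for eng, ipa in simple_map.items():
--         result = result.replace(eng, ipa)
--
--     return " ".join(result)
-- ===== SOURCE B (Python) =====
-- def _digraph(a, b):
--     if a == "t" and b == "h":
--         return "θ"
--     if a == "s" and b == "h":
--         return "ʃ"
--     if a == "c" and b == "h":
--         return "tʃ"
--     if a == "n" and b == "g":
--         return "ŋ"
--     return None
--
--
-- def _vowel(c):
--     if c == "a":
--         return "æ"
--     if c == "e":
--         return "ɛ"
--     if c == "i":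
--         return "ɪ"
--     if c == "o":
--         return "ɑ"
--     if c == "u":
--         return "ʌ"
--     return c
--
--
-- def text_to_ipa_estimate(text: str) -> str:
--     s = text.lower()
--     out = []
--     i = 0
--     n = len(s)
--     while i < n:
--         d = _digraph(s[i], s[i + 1]) if i + 1 < n else None
--         if d is not None:
--             out.append(d)
--             i += 2
--         else:
--             out.append(_vowel(s[i]))
--             i += 1
--     return " ".join("".join(out))
-- ===== Notes on version B (the rewrite author's own statement) =====
-- stated objective: alternative
-- what changed: Replaces A's nine sequential str.replace passes over the whole string with a single left-to-right scan that uses a two-character lookahead to map digraphs and vowels in one traversal.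
import Mathlib
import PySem

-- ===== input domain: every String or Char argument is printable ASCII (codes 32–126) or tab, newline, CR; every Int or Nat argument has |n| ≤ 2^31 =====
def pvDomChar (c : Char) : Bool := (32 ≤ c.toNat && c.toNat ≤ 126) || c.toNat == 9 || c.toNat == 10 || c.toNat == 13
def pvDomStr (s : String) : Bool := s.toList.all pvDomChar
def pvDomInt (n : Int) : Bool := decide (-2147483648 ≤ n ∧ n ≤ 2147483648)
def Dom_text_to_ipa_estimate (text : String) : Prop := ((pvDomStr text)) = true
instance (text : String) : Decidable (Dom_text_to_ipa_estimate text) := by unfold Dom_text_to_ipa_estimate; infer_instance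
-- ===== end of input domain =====

-- B replaces A's nine sequential str.replace passes with one left-to-right scan with a
-- two-character lookahead (objective: alternative — one traversal instead of nine).

-- ===== PORT A =====
def text_to_ipa_estimate (text : String) : String :=
  -- simple_map.items() in insertion order
  let simpleMap : List (String × String) :=
    [("th", "θ"), ("sh", "ʃ"), ("ch", "tʃ"), ("ng", "ŋ"),
     ("a", "æ"), ("e", "ɛ"), ("i", "ɪ"), ("o", "ɑ"), ("u", "ʌ")]
  let result := simpleMap.foldl (fun r p => PySem.Str.replace r p.1 p.2) (PySem.Str.lower text)
  -- " ".join(result) iterates over the characters of result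
  PySem.Str.join " " (result.toList.map (fun c => String.ofList [c]))

-- ===== PORT B =====
def pvDigraph (a b : Char) : Option (List Char) :=
  if a = 't' && b = 'h' then some ['θ']
  else if a = 's' && b = 'h' then some ['ʃ']
  else if a = 'c' && b = 'h' then some ['t', 'ʃ']
  else if a = 'n' && b = 'g' then some ['ŋ']
  else none

def pvVowel (c : Char) : List Char :=
  if c = 'a' then ['æ']
  else if c = 'e' then ['ɛ']
  else if c = 'i' then ['ɪ']
  else if c = 'o' then ['ɑ']
  else if c = 'u' then ['ʌ']
  else [c]

-- the while loop of B: one pass, two-character lookahead ("".join(out))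
def pvScan : List Char → List Char
  | [] => []
  | [c] => pvVowel c
  | a :: b :: t =>
    match pvDigraph a b with
    | some d => d ++ pvScan t
    | none => pvVowel a ++ pvScan (b :: t)

def text_to_ipa_estimate_alt (text : String) : String :=
  let s := PySem.Str.lower text
  PySem.Str.join " " ((pvScan s.toList).map (fun c => String.ofList [c]))

-- ===== PRECONDITION & SPEC =====
def Spec_text_to_ipa_estimate (text : String) (out : String) : Prop := out = text_to_ipa_estimate_alt text
instance (text : String) (out : String) : Decidable (Spec_text_to_ipa_estimate text out) := by unfold Spec_text_to_ipa_estimate; infer_instance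

-- ===== CLAIM (what is proved, stated in full; the proofs are below) =====
def Claim_equal_text_to_ipa_estimate : Prop := ∀ (text : String), Dom_text_to_ipa_estimate text → Spec_text_to_ipa_estimate text (text_to_ipa_estimate text)

-- ===== LEMMAS AND PROOFS =====

-- structural equations for PySem.Chars.replace with a nonempty pattern

lemma pvGo_cons (old new : List Char) (fuel : Nat) (c : Char) (t acc : List Char) :
    PySem.Chars.replace.go old new (fuel+1) (c::t) acc =
      if old.isPrefixOf (c::t) then PySem.Chars.replace.go old new fuel (List.drop old.length (c::t)) (new.reverse ++ acc)
      else PySem.Chars.replace.go old new fuel t (c::acc) := rfl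

lemma pvGo_acc (old new : List Char) : ∀ (fuel : Nat) (l acc : List Char),
    PySem.Chars.replace.go old new fuel l acc = acc.reverse ++ PySem.Chars.replace.go old new fuel l [] := by
  intro fuel
  induction fuel with
  | zero => intro l acc; simp [PySem.Chars.replace.go]
  | succ f ih =>
    intro l acc
    cases l with
    | nil => simp [PySem.Chars.replace.go]
    | cons c t =>
      rw [pvGo_cons, pvGo_cons]
      by_cases h : old.isPrefixOf (c :: t)
      · rw [if_pos h, if_pos h, ih _ (new.reverse ++ acc), ih _ (new.reverse ++ [])]
        simp
      · rw [if_neg h, if_neg h, ih t (c :: acc), ih t [c]]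
        simp

lemma pvGo_fuel (old new : List Char) (hold : old ≠ []) : ∀ (fuel : Nat) (l : List Char), l.length ≤ fuel →
    PySem.Chars.replace.go old new fuel l [] = PySem.Chars.replace.go old new l.length l [] := by
  intro fuel
  induction fuel using Nat.strong_induction_on with
  | _ fuel ih =>
    intro l hl
    cases fuel with
    | zero =>
      have : l = [] := by cases l <;> simp_all
      subst this; rfl
    | succ f =>
      cases l with
      | nil => simp [PySem.Chars.replace.go]
      | cons c t =>
        have ht : t.length ≤ f := by simpa using hl
        simp only [List.length_cons]
        rw [pvGo_cons, pvGo_cons]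
        by_cases h : old.isPrefixOf (c :: t)
        · have hk : 1 ≤ old.length := by cases old with
            | nil => exact absurd rfl hold
            | cons _ _ => simp
          have hd : (List.drop old.length (c :: t)).length ≤ t.length := by
            simp only [List.length_drop, List.length_cons]; omega
          rw [if_pos h, if_pos h, pvGo_acc, pvGo_acc old new t.length,
              ih f (by omega) _ (hd.trans ht), ih t.length (by omega) _ hd]
        · rw [if_neg h, if_neg h, pvGo_acc, pvGo_acc old new t.length,
              ih f (by omega) t ht, ih t.length (by omega) t (le_refl _)]

lemma pvRep_eq (s old new : List Char) (hold : old ≠ []) :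
    PySem.Chars.replace s old new = PySem.Chars.replace.go old new s.length s [] := by
  rw [PySem.Chars.replace, if_neg (by simpa [List.isEmpty_iff] using hold)]

lemma pvRep_nil (old new : List Char) (hold : old ≠ []) :
    PySem.Chars.replace [] old new = [] := by
  rw [pvRep_eq _ _ _ hold]; rfl

lemma pvRepD_pos (k0 k1 : Char) (nw rest : List Char) :
    PySem.Chars.replace (k0 :: k1 :: rest) [k0, k1] nw = nw ++ PySem.Chars.replace rest [k0, k1] nw := by
  rw [pvRep_eq _ _ _ (by simp), pvRep_eq _ _ _ (by simp)]
  simp only [List.length_cons]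
  rw [pvGo_cons, if_pos (by simp [List.isPrefixOf])]
  simp only [List.length_cons, List.length_nil, List.drop_succ_cons, List.drop_zero, Nat.zero_add]
  rw [pvGo_acc, pvGo_fuel [k0, k1] nw (by simp) (rest.length + 1) rest (by omega)]
  simp

lemma pvRepD_neg (k0 k1 c : Char) (h : c ≠ k0) (nw rest : List Char) :
    PySem.Chars.replace (c :: rest) [k0, k1] nw = c :: PySem.Chars.replace rest [k0, k1] nw := by
  rw [pvRep_eq _ _ _ (by simp), pvRep_eq _ _ _ (by simp)]
  simp only [List.length_cons]
  have hp : ¬ (([k0, k1] : List Char).isPrefixOf (c :: rest) = true) := by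
    cases rest <;> simp [List.isPrefixOf] <;> intro h' <;> exact absurd h'.symm h
  rw [pvGo_cons, if_neg hp, pvGo_acc]
  simp

lemma pvRepD_neg2 (k0 k1 b : Char) (h : b ≠ k1) (nw rest : List Char) :
    PySem.Chars.replace (k0 :: b :: rest) [k0, k1] nw = k0 :: PySem.Chars.replace (b :: rest) [k0, k1] nw := by
  rw [pvRep_eq _ _ _ (by simp), pvRep_eq _ _ _ (by simp)]
  simp only [List.length_cons]
  have hp : ¬ (([k0, k1] : List Char).isPrefixOf (k0 :: b :: rest) = true) := by
    simp [List.isPrefixOf]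
    intro h'; exact absurd h'.symm h
  rw [pvGo_cons, if_neg hp, pvGo_acc]
  simp

lemma pvRepS_pos (k : Char) (nw rest : List Char) :
    PySem.Chars.replace (k :: rest) [k] nw = nw ++ PySem.Chars.replace rest [k] nw := by
  rw [pvRep_eq _ _ _ (by simp), pvRep_eq _ _ _ (by simp)]
  simp only [List.length_cons]
  rw [pvGo_cons, if_pos (by simp [List.isPrefixOf])]
  simp only [List.length_cons, List.length_nil, List.drop_succ_cons, List.drop_zero, Nat.zero_add]
  rw [pvGo_acc]
  simp

lemma pvRepS_neg (k c : Char) (h : c ≠ k) (nw rest : List Char) :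
    PySem.Chars.replace (c :: rest) [k] nw = c :: PySem.Chars.replace rest [k] nw := by
  rw [pvRep_eq _ _ _ (by simp), pvRep_eq _ _ _ (by simp)]
  simp only [List.length_cons]
  have hp : ¬ (([k] : List Char).isPrefixOf (c :: rest) = true) := by
    simp [List.isPrefixOf]
    intro h'; exact absurd h'.symm h
  rw [pvGo_cons, if_neg hp, pvGo_acc]
  simp

lemma pvRepD_one (k0 k1 c : Char) (nw : List Char) :
    PySem.Chars.replace [c] [k0, k1] nw = [c] := by
  rw [pvRep_eq _ _ _ (by simp)]
  have hp : ¬ (([k0, k1] : List Char).isPrefixOf [c] = true) := by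
    simp [List.isPrefixOf]
  rw [show ([c] : List Char).length = 0 + 1 from rfl, pvGo_cons, if_neg hp]
  rfl

lemma pvRepD_neg2' (k0 k1 : Char) (w : List Char) (h : w.head? ≠ some k1) (nw : List Char) :
    PySem.Chars.replace (k0 :: w) [k0, k1] nw = k0 :: PySem.Chars.replace w [k0, k1] nw := by
  cases w with
  | nil => rw [pvRepD_one, pvRep_nil _ _ (by simp)]
  | cons b rest => exact pvRepD_neg2 k0 k1 b (by simpa using h) nw rest

lemma pvRep_head (k0 k1 : Char) (nw m : List Char) (hnw : nw ≠ []) :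
    (PySem.Chars.replace m [k0, k1] nw).head? = m.head? ∨
      (PySem.Chars.replace m [k0, k1] nw).head? = nw.head? := by
  cases m with
  | nil => left; rw [pvRep_nil _ _ (by simp)]
  | cons c t =>
    by_cases hc : c = k0
    · subst hc
      cases t with
      | nil => left; rw [pvRepD_one]
      | cons b rest =>
        by_cases hb : b = k1
        · subst hb; right; rw [pvRepD_pos]
          cases nw with
          | nil => exact absurd rfl hnw
          | cons _ _ => simp
        · left; rw [pvRepD_neg2 _ _ _ hb]; simp
    · left; rw [pvRepD_neg _ _ _ hc]; simp

-- A's pipeline on the character-list side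
def pvPipe (m : List Char) : List Char :=
  PySem.Chars.replace
    (PySem.Chars.replace
      (PySem.Chars.replace
        (PySem.Chars.replace
          (PySem.Chars.replace
            (PySem.Chars.replace
              (PySem.Chars.replace
                (PySem.Chars.replace
                  (PySem.Chars.replace m ['t','h'] ['θ'])
                  ['s','h'] ['ʃ'])
                ['c','h'] ['t','ʃ'])
              ['n','g'] ['ŋ'])
            ['a'] ['æ'])
          ['e'] ['ɛ'])
        ['i'] ['ɪ'])
      ['o'] ['ɑ'])
    ['u'] ['ʌ']

lemma pvPipe_nil : pvPipe [] = [] := by decide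

lemma pvPipe_th (r : List Char) : pvPipe ('t' :: 'h' :: r) = 'θ' :: pvPipe r := by
  simp only [pvPipe]
  rw [pvRepD_pos]
  simp only [List.singleton_append]
  rw [pvRepD_neg 's' 'h' 'θ' (by decide), pvRepD_neg 'c' 'h' 'θ' (by decide),
      pvRepD_neg 'n' 'g' 'θ' (by decide), pvRepS_neg 'a' 'θ' (by decide),
      pvRepS_neg 'e' 'θ' (by decide), pvRepS_neg 'i' 'θ' (by decide),
      pvRepS_neg 'o' 'θ' (by decide), pvRepS_neg 'u' 'θ' (by decide)]

lemma pvPipe_sh (r : List Char) : pvPipe ('s' :: 'h' :: r) = 'ʃ' :: pvPipe r := by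
  simp only [pvPipe]
  rw [pvRepD_neg 't' 'h' 's' (by decide), pvRepD_neg 't' 'h' 'h' (by decide), pvRepD_pos]
  simp only [List.singleton_append]
  rw [pvRepD_neg 'c' 'h' 'ʃ' (by decide), pvRepD_neg 'n' 'g' 'ʃ' (by decide),
      pvRepS_neg 'a' 'ʃ' (by decide), pvRepS_neg 'e' 'ʃ' (by decide),
      pvRepS_neg 'i' 'ʃ' (by decide), pvRepS_neg 'o' 'ʃ' (by decide),
      pvRepS_neg 'u' 'ʃ' (by decide)]

lemma pvPipe_ch (r : List Char) : pvPipe ('c' :: 'h' :: r) = 't' :: 'ʃ' :: pvPipe r := by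
  simp only [pvPipe]
  rw [pvRepD_neg 't' 'h' 'c' (by decide), pvRepD_neg 't' 'h' 'h' (by decide),
      pvRepD_neg 's' 'h' 'c' (by decide), pvRepD_neg 's' 'h' 'h' (by decide),
      pvRepD_pos]
  simp only [List.cons_append, List.nil_append]
  rw [pvRepD_neg 'n' 'g' 't' (by decide), pvRepD_neg 'n' 'g' 'ʃ' (by decide),
      pvRepS_neg 'a' 't' (by decide), pvRepS_neg 'a' 'ʃ' (by decide),
      pvRepS_neg 'e' 't' (by decide), pvRepS_neg 'e' 'ʃ' (by decide),
      pvRepS_neg 'i' 't' (by decide), pvRepS_neg 'i' 'ʃ' (by decide),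
      pvRepS_neg 'o' 't' (by decide), pvRepS_neg 'o' 'ʃ' (by decide),
      pvRepS_neg 'u' 't' (by decide), pvRepS_neg 'u' 'ʃ' (by decide)]

lemma pvPipe_ng (r : List Char) : pvPipe ('n' :: 'g' :: r) = 'ŋ' :: pvPipe r := by
  simp only [pvPipe]
  rw [pvRepD_neg 't' 'h' 'n' (by decide), pvRepD_neg 't' 'h' 'g' (by decide),
      pvRepD_neg 's' 'h' 'n' (by decide), pvRepD_neg 's' 'h' 'g' (by decide),
      pvRepD_neg 'c' 'h' 'n' (by decide), pvRepD_neg 'c' 'h' 'g' (by decide),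
      pvRepD_pos]
  simp only [List.singleton_append]
  rw [pvRepS_neg 'a' 'ŋ' (by decide), pvRepS_neg 'e' 'ŋ' (by decide),
      pvRepS_neg 'i' 'ŋ' (by decide), pvRepS_neg 'o' 'ŋ' (by decide),
      pvRepS_neg 'u' 'ŋ' (by decide)]

lemma pvPipe_t (b : Char) (hb : b ≠ 'h') (r : List Char) :
    pvPipe ('t' :: b :: r) = 't' :: pvPipe (b :: r) := by
  simp only [pvPipe]
  rw [pvRepD_neg2 't' 'h' b hb, pvRepD_neg 's' 'h' 't' (by decide),
      pvRepD_neg 'c' 'h' 't' (by decide), pvRepD_neg 'n' 'g' 't' (by decide),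
      pvRepS_neg 'a' 't' (by decide), pvRepS_neg 'e' 't' (by decide),
      pvRepS_neg 'i' 't' (by decide), pvRepS_neg 'o' 't' (by decide),
      pvRepS_neg 'u' 't' (by decide)]

lemma pvPipe_s (b : Char) (hb : b ≠ 'h') (r : List Char) :
    pvPipe ('s' :: b :: r) = 's' :: pvPipe (b :: r) := by
  simp only [pvPipe]
  have hw : (PySem.Chars.replace (b :: r) ['t','h'] ['θ']).head? ≠ some 'h' := by
    rcases pvRep_head 't' 'h' ['θ'] (b :: r) (by simp) with h' | h' <;>
      rw [h'] <;> simp [hb]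
  rw [pvRepD_neg 't' 'h' 's' (by decide), pvRepD_neg2' 's' 'h' _ hw,
      pvRepD_neg 'c' 'h' 's' (by decide), pvRepD_neg 'n' 'g' 's' (by decide),
      pvRepS_neg 'a' 's' (by decide), pvRepS_neg 'e' 's' (by decide),
      pvRepS_neg 'i' 's' (by decide), pvRepS_neg 'o' 's' (by decide),
      pvRepS_neg 'u' 's' (by decide)]

lemma pvPipe_c (b : Char) (hb : b ≠ 'h') (r : List Char) :
    pvPipe ('c' :: b :: r) = 'c' :: pvPipe (b :: r) := by
  simp only [pvPipe]
  have hw1 : (PySem.Chars.replace (b :: r) ['t','h'] ['θ']).head? ≠ some 'h' := by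
    rcases pvRep_head 't' 'h' ['θ'] (b :: r) (by simp) with h' | h' <;>
      rw [h'] <;> simp [hb]
  have hw2 : (PySem.Chars.replace (PySem.Chars.replace (b :: r) ['t','h'] ['θ']) ['s','h'] ['ʃ']).head? ≠ some 'h' := by
    rcases pvRep_head 's' 'h' ['ʃ'] (PySem.Chars.replace (b :: r) ['t','h'] ['θ']) (by simp) with h' | h' <;>
      rw [h'] <;> simp_all
  rw [pvRepD_neg 't' 'h' 'c' (by decide), pvRepD_neg 's' 'h' 'c' (by decide),
      pvRepD_neg2' 'c' 'h' _ hw2, pvRepD_neg 'n' 'g' 'c' (by decide),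
      pvRepS_neg 'a' 'c' (by decide), pvRepS_neg 'e' 'c' (by decide),
      pvRepS_neg 'i' 'c' (by decide), pvRepS_neg 'o' 'c' (by decide),
      pvRepS_neg 'u' 'c' (by decide)]

lemma pvPipe_n (b : Char) (hb : b ≠ 'g') (r : List Char) :
    pvPipe ('n' :: b :: r) = 'n' :: pvPipe (b :: r) := by
  simp only [pvPipe]
  have hw1 : (PySem.Chars.replace (b :: r) ['t','h'] ['θ']).head? ≠ some 'g' := by
    rcases pvRep_head 't' 'h' ['θ'] (b :: r) (by simp) with h' | h' <;>
      rw [h'] <;> simp [hb]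
  have hw2 : (PySem.Chars.replace (PySem.Chars.replace (b :: r) ['t','h'] ['θ']) ['s','h'] ['ʃ']).head? ≠ some 'g' := by
    rcases pvRep_head 's' 'h' ['ʃ'] (PySem.Chars.replace (b :: r) ['t','h'] ['θ']) (by simp) with h' | h' <;>
      rw [h'] <;> simp_all
  have hw3 : (PySem.Chars.replace (PySem.Chars.replace (PySem.Chars.replace (b :: r) ['t','h'] ['θ']) ['s','h'] ['ʃ']) ['c','h'] ['t','ʃ']).head? ≠ some 'g' := by
    rcases pvRep_head 'c' 'h' ['t','ʃ'] (PySem.Chars.replace (PySem.Chars.replace (b :: r) ['t','h'] ['θ']) ['s','h'] ['ʃ']) (by simp) with h' | h' <;>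
      rw [h'] <;> simp_all
  rw [pvRepD_neg 't' 'h' 'n' (by decide), pvRepD_neg 's' 'h' 'n' (by decide),
      pvRepD_neg 'c' 'h' 'n' (by decide), pvRepD_neg2' 'n' 'g' _ hw3,
      pvRepS_neg 'a' 'n' (by decide), pvRepS_neg 'e' 'n' (by decide),
      pvRepS_neg 'i' 'n' (by decide), pvRepS_neg 'o' 'n' (by decide),
      pvRepS_neg 'u' 'n' (by decide)]

lemma pvPipe_a (r : List Char) : pvPipe ('a' :: r) = 'æ' :: pvPipe r := by
  simp only [pvPipe]
  rw [pvRepD_neg 't' 'h' 'a' (by decide), pvRepD_neg 's' 'h' 'a' (by decide),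
      pvRepD_neg 'c' 'h' 'a' (by decide), pvRepD_neg 'n' 'g' 'a' (by decide),
      pvRepS_pos]
  simp only [List.singleton_append]
  rw [pvRepS_neg 'e' 'æ' (by decide), pvRepS_neg 'i' 'æ' (by decide),
      pvRepS_neg 'o' 'æ' (by decide), pvRepS_neg 'u' 'æ' (by decide)]

lemma pvPipe_e (r : List Char) : pvPipe ('e' :: r) = 'ɛ' :: pvPipe r := by
  simp only [pvPipe]
  rw [pvRepD_neg 't' 'h' 'e' (by decide), pvRepD_neg 's' 'h' 'e' (by decide),
      pvRepD_neg 'c' 'h' 'e' (by decide), pvRepD_neg 'n' 'g' 'e' (by decide),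
      pvRepS_neg 'a' 'e' (by decide), pvRepS_pos]
  simp only [List.singleton_append]
  rw [pvRepS_neg 'i' 'ɛ' (by decide), pvRepS_neg 'o' 'ɛ' (by decide),
      pvRepS_neg 'u' 'ɛ' (by decide)]

lemma pvPipe_i (r : List Char) : pvPipe ('i' :: r) = 'ɪ' :: pvPipe r := by
  simp only [pvPipe]
  rw [pvRepD_neg 't' 'h' 'i' (by decide), pvRepD_neg 's' 'h' 'i' (by decide),
      pvRepD_neg 'c' 'h' 'i' (by decide), pvRepD_neg 'n' 'g' 'i' (by decide),
      pvRepS_neg 'a' 'i' (by decide), pvRepS_neg 'e' 'i' (by decide), pvRepS_pos]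
  simp only [List.singleton_append]
  rw [pvRepS_neg 'o' 'ɪ' (by decide), pvRepS_neg 'u' 'ɪ' (by decide)]

lemma pvPipe_o (r : List Char) : pvPipe ('o' :: r) = 'ɑ' :: pvPipe r := by
  simp only [pvPipe]
  rw [pvRepD_neg 't' 'h' 'o' (by decide), pvRepD_neg 's' 'h' 'o' (by decide),
      pvRepD_neg 'c' 'h' 'o' (by decide), pvRepD_neg 'n' 'g' 'o' (by decide),
      pvRepS_neg 'a' 'o' (by decide), pvRepS_neg 'e' 'o' (by decide),
      pvRepS_neg 'i' 'o' (by decide), pvRepS_pos]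
  simp only [List.singleton_append]
  rw [pvRepS_neg 'u' 'ɑ' (by decide)]

lemma pvPipe_u (r : List Char) : pvPipe ('u' :: r) = 'ʌ' :: pvPipe r := by
  simp only [pvPipe]
  rw [pvRepD_neg 't' 'h' 'u' (by decide), pvRepD_neg 's' 'h' 'u' (by decide),
      pvRepD_neg 'c' 'h' 'u' (by decide), pvRepD_neg 'n' 'g' 'u' (by decide),
      pvRepS_neg 'a' 'u' (by decide), pvRepS_neg 'e' 'u' (by decide),
      pvRepS_neg 'i' 'u' (by decide), pvRepS_neg 'o' 'u' (by decide), pvRepS_pos]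
  simp only [List.singleton_append]

lemma pvPipe_other (c : Char) (h1 : c ≠ 't') (h2 : c ≠ 's') (h3 : c ≠ 'c') (h4 : c ≠ 'n')
    (h5 : c ≠ 'a') (h6 : c ≠ 'e') (h7 : c ≠ 'i') (h8 : c ≠ 'o') (h9 : c ≠ 'u')
    (r : List Char) : pvPipe (c :: r) = c :: pvPipe r := by
  simp only [pvPipe]
  rw [pvRepD_neg 't' 'h' c h1, pvRepD_neg 's' 'h' c h2, pvRepD_neg 'c' 'h' c h3,
      pvRepD_neg 'n' 'g' c h4, pvRepS_neg 'a' c h5, pvRepS_neg 'e' c h6,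
      pvRepS_neg 'i' c h7, pvRepS_neg 'o' c h8, pvRepS_neg 'u' c h9]

lemma pvScan_none (a b : Char) (t : List Char) (h : pvDigraph a b = none) :
    pvScan (a :: b :: t) = pvVowel a ++ pvScan (b :: t) := by
  simp [pvScan, h]

lemma pvPipe_eq_scan : ∀ (n : Nat) (m : List Char), m.length ≤ n → pvPipe m = pvScan m := by
  intro n
  induction n with
  | zero =>
    intro m hm
    have : m = [] := by cases m <;> simp_all
    subst this
    simp [pvPipe_nil, pvScan]
  | succ n ih =>
    intro m hm
    match m with
    | [] => simp [pvPipe_nil, pvScan]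
    | [c] =>
      show pvPipe [c] = pvVowel c
      by_cases h1 : c = 't'; · subst h1; decide
      by_cases h2 : c = 's'; · subst h2; decide
      by_cases h3 : c = 'c'; · subst h3; decide
      by_cases h4 : c = 'n'; · subst h4; decide
      by_cases h5 : c = 'a'; · subst h5; decide
      by_cases h6 : c = 'e'; · subst h6; decide
      by_cases h7 : c = 'i'; · subst h7; decide
      by_cases h8 : c = 'o'; · subst h8; decide
      by_cases h9 : c = 'u'; · subst h9; decide
      rw [pvPipe_other c h1 h2 h3 h4 h5 h6 h7 h8 h9, pvPipe_nil]
      simp [pvVowel, h5, h6, h7, h8, h9]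
    | a :: b :: t =>
      have hmt : t.length ≤ n := by simp at hm; omega
      have hmb : (b :: t).length ≤ n := by simp at hm ⊢; omega
      by_cases h1 : a = 't'
      · subst h1
        by_cases hb : b = 'h'
        · subst hb; rw [pvPipe_th, ih t hmt]; simp [pvScan, pvDigraph]
        · rw [pvPipe_t b hb, ih _ hmb, pvScan_none _ _ _ (by simp [pvDigraph, hb])]
          simp [pvVowel]
      by_cases h2 : a = 's'
      · subst h2
        by_cases hb : b = 'h'
        · subst hb; rw [pvPipe_sh, ih t hmt]; simp [pvScan, pvDigraph]
        · rw [pvPipe_s b hb, ih _ hmb, pvScan_none _ _ _ (by simp [pvDigraph, hb])]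
          simp [pvVowel]
      by_cases h3 : a = 'c'
      · subst h3
        by_cases hb : b = 'h'
        · subst hb; rw [pvPipe_ch, ih t hmt]; simp [pvScan, pvDigraph]
        · rw [pvPipe_c b hb, ih _ hmb, pvScan_none _ _ _ (by simp [pvDigraph, hb])]
          simp [pvVowel]
      by_cases h4 : a = 'n'
      · subst h4
        by_cases hb : b = 'g'
        · subst hb; rw [pvPipe_ng, ih t hmt]; simp [pvScan, pvDigraph]
        · rw [pvPipe_n b hb, ih _ hmb, pvScan_none _ _ _ (by simp [pvDigraph, hb])]
          simp [pvVowel]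
      have hdg : pvDigraph a b = none := by simp [pvDigraph, h1, h2, h3, h4]
      rw [pvScan_none _ _ _ hdg]
      by_cases h5 : a = 'a'
      · subst h5; rw [pvPipe_a, ih _ hmb]; simp [pvVowel]
      by_cases h6 : a = 'e'
      · subst h6; rw [pvPipe_e, ih _ hmb]; simp [pvVowel]
      by_cases h7 : a = 'i'
      · subst h7; rw [pvPipe_i, ih _ hmb]; simp [pvVowel]
      by_cases h8 : a = 'o'
      · subst h8; rw [pvPipe_o, ih _ hmb]; simp [pvVowel]
      by_cases h9 : a = 'u'
      · subst h9; rw [pvPipe_u, ih _ hmb]; simp [pvVowel]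
      rw [pvPipe_other a h1 h2 h3 h4 h5 h6 h7 h8 h9, ih _ hmb]
      simp [pvVowel, h5, h6, h7, h8, h9]

lemma pvPipe_eq_scan' (m : List Char) : pvPipe m = pvScan m :=
  pvPipe_eq_scan m.length m (le_refl _)

-- ===== VERDICT (by name: the statement is the Claim_ definition above) =====
theorem text_to_ipa_estimate_spec : Claim_equal_text_to_ipa_estimate := by
  intro text _
  show PySem.Str.join " " ((([("th", "θ"), ("sh", "ʃ"), ("ch", "tʃ"), ("ng", "ŋ"), ("a", "æ"),
        ("e", "ɛ"), ("i", "ɪ"), ("o", "ɑ"), ("u", "ʌ")] : List (String × String)).foldl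
          (fun r p => PySem.Str.replace r p.1 p.2) (PySem.Str.lower text)).toList.map (fun c => String.ofList [c]))
      = PySem.Str.join " " ((pvScan (PySem.Str.lower text).toList).map (fun c => String.ofList [c]))
  have key : (([("th", "θ"), ("sh", "ʃ"), ("ch", "tʃ"), ("ng", "ŋ"), ("a", "æ"),
        ("e", "ɛ"), ("i", "ɪ"), ("o", "ɑ"), ("u", "ʌ")] : List (String × String)).foldl
          (fun r p => PySem.Str.replace r p.1 p.2) (PySem.Str.lower text)).toList
      = pvScan (PySem.Str.lower text).toList := by
    rw [← pvPipe_eq_scan']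
    simp only [List.foldl]
    simp only [PySem.Str.toList_replace, pvPipe]
    rfl
  rw [key]
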